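-- pv_equiv track=rewrite | github.com/wecode-ai/Wegent | shared/utils/markdown_util.py | remap_markdown_headings
-- ===== SOURCE A (Python) =====
-- from typing import Optional, Tuple
--
-- _MIN_HEADING_LEVEL = 1
--
-- _MAX_HEADING_LEVEL = 6
--
-- def _heading_info(line: str) -> Optional[Tuple[int, int]]:
--     """If the line is an ATX-style heading, return (indent_len, level); otherwise None."""
--     n = len(line)
--     if n == 0:
--         return None
--
--     # 1. Count leading whitespace as indent
--     i = 0
--     while i < n and line[i] in (" ", "\t"):
--         i += 1
--     indent_len = i
--
--     # 2. Count consecutive '#' characters (heading hashes)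
--     hash_start = i
--     while i < n and line[i] == "#":
--         i += 1
--     level = i - hash_start
--
--     # Heading level must be in the valid range
--     if level < _MIN_HEADING_LEVEL or level > _MAX_HEADING_LEVEL:
--         return None
--
--     # 3. Next character must be at least one whitespace to be a valid ATX heading
--     if i >= n or line[i] not in (" ", "\t"):
--         return None
--
--     return indent_len, level
--
-- def remap_markdown_headings(md_text: str, target_top_level: int = 1) -> str:
--     """Remap ATX-style Markdown headings based on the top heading in the document."""
--     # Clamp the target level to the valid range
--     target_top_level = max(
--         _MIN_HEADING_LEVEL, min(target_top_level, _MAX_HEADING_LEVEL)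
--     )
--
--     # Preserve line endings so output format stays identical
--     lines = md_text.splitlines(keepends=True)
--
--     # First pass: find the minimum heading level in the document
--     min_level: Optional[int] = None
--     for line in lines:
--         info = _heading_info(line.rstrip("\n"))
--         if info is None:
--             continue
--         _, level = info
--         if min_level is None or level < min_level:
--             min_level = level
--
--     # No headings found; return original text
--     if min_level is None:
--         return md_text
--
--     offset = target_top_level - min_level
--
--     # Second pass: rebuild lines with remapped heading levels
--     out: list[str] = []
--     for line in lines:
--         # Strip newline for parsing, but remember it to preserve exactly
--         if line.endswith("\n"):
--             content = line[:-1]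
--             newline = "\n"
--         else:
--             content = line
--             newline = ""
--
--         info = _heading_info(content)
--         if info is None:
--             out.append(line)
--             continue
--
--         indent_len, old_level = info
--         new_level = max(
--             _MIN_HEADING_LEVEL,
--             min(old_level + offset, _MAX_HEADING_LEVEL),
--         )
--
--         # Slice the original line to preserve original spaces and text
--         indent = content[:indent_len]
--         hashes_and_rest = content[indent_len:]
--         # The first old_level characters of hashes_and_rest are '#'
--         rest = hashes_and_rest[
--             old_level:
--         ]  # includes original whitespace and heading text
--         new_line = f"{indent}{'#' * new_level}{rest}{newline}"
--         out.append(new_line)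
--
--     return "".join(out)
-- ===== SOURCE B (Python) =====
-- _MIN_HEADING_LEVEL = 1
--
-- _MAX_HEADING_LEVEL = 6
--
--
-- def remap_markdown_headings(md_text: str, target_top_level: int = 1) -> str:
--     """Remap ATX-style Markdown headings based on the top heading in the document."""
--     target = max(_MIN_HEADING_LEVEL, min(target_top_level, _MAX_HEADING_LEVEL))
--
--     n = len(md_text)
--     # One character-level scan over the raw text (no line splitting): collect the
--     # (hash_start, level) span of every ATX heading.
--     spans = []
--     i = 0
--     while i < n:
--         j = i
--         while j < n and md_text[j] in " \t":
--             j += 1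
--         k = j
--         while k < n and md_text[k] == "#":
--             k += 1
--         level = k - j
--         if (
--             _MIN_HEADING_LEVEL <= level <= _MAX_HEADING_LEVEL
--             and k < n
--             and md_text[k] in " \t"
--         ):
--             spans.append((j, level))
--         # advance to the start of the next line
--         e = i
--         while e < n and md_text[e] not in "\r\n":
--             e += 1
--         if e < n:
--             e += 2 if md_text[e] == "\r" and e + 1 < n and md_text[e + 1] == "\n" else 1
--         i = e
--
--     if not spans:
--         return md_text
--
--     offset = target - min(level for _, level in spans)
--
--     # Splice: copy the original text verbatim, replacing each heading's hash run
--     # with the remapped run.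
--     parts = []
--     prev = 0
--     for hs, level in spans:
--         new_level = max(_MIN_HEADING_LEVEL, min(level + offset, _MAX_HEADING_LEVEL))
--         parts.append(md_text[prev:hs])
--         parts.append("#" * new_level)
--         prev = hs + level
--     parts.append(md_text[prev:])
--     return "".join(parts)
-- ===== Notes on version B (the rewrite author's own statement) =====
-- stated objective: alternative
-- what changed: B never splits the text into lines: one character-level scan over the raw string records the absolute (position, level) span of every heading hash run (and the minimum level), and the result is produced by splicing the original string, replacing only those hash runs, instead of A's splitlines + per-line rebuild of every line.
import Mathlib
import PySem

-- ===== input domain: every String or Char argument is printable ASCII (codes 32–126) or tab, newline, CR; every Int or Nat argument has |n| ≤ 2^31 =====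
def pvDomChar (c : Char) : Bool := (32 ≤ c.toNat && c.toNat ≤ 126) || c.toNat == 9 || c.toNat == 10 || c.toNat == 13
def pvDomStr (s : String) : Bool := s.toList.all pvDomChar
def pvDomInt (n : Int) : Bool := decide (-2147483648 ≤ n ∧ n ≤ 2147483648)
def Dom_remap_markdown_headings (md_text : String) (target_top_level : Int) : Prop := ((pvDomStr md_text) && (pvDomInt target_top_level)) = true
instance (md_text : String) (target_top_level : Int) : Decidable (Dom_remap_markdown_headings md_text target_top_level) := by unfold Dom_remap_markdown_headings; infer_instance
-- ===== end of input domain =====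

-- B replaces A's splitlines + per-line rebuild by one character-level scan of the raw text that
-- collects the absolute (position, level) span of every heading hash run, then splices the
-- original string, substituting only those runs (objective: alternative, not claimed faster).


-- ===== PORT A =====

-- str.splitlines(keepends=True): ported by hand (PySem.Str.splitlines drops the line ends).
-- Exact on Dom (only '\n', '\r', '\r\n' can occur as line boundaries there).
def splitKE : List Char → List (List Char)
  | [] => []
  | '\n' :: rest => ['\n'] :: splitKE rest
  | '\r' :: '\n' :: rest => ['\r', '\n'] :: splitKE rest
  | '\r' :: rest => ['\r'] :: splitKE rest
  | c :: rest =>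
    match splitKE rest with
    | [] => [[c]]
    | l :: ls => (c :: l) :: ls

-- line.rstrip("\n"): ported by hand (drop trailing '\n' characters; exact)
def rstripNL (cs : List Char) : List Char := (cs.reverse.dropWhile (· == '\n')).reverse

-- _heading_info: the two index-counting while loops are the takeWhile lengths; exact
def headingInfo (line : List Char) : Option (Nat × Nat) :=
  if line = [] then none
  else
    let indent_len := (line.takeWhile (fun c => c == ' ' || c == '\t')).length
    let afterIndent := line.drop indent_len
    let level := (afterIndent.takeWhile (· == '#')).length
    if level < 1 ∨ 6 < level then none
    else
      match afterIndent.drop level with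
      | [] => none
      | c :: _ => if c == ' ' || c == '\t' then some (indent_len, level) else none

def remap_markdown_headings (md_text : String) (target_top_level : Int) : String :=
  let target := max 1 (min target_top_level 6)
  let lines := splitKE md_text.toList
  -- first pass: minimum heading level
  let min_level : Option Nat := lines.foldl (fun acc line =>
    match headingInfo (rstripNL line) with
    | none => acc
    | some (_, level) =>
      match acc with
      | none => some level
      | some m => if level < m then some level else acc) none
  match min_level with
  | none => md_text
  | some m =>
    let offset : Int := target - (m : Int)
    -- second pass: rebuild each line (out.append = ++ [·])
    let out : List (List Char) := lines.foldl (fun out line =>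
      out ++
        [let (content, newline) :=
           -- line.endswith("\n") / line[:-1]: a keepends line is nonempty, so this is its last char
           if line.getLast? = some '\n' then (line.dropLast, ['\n']) else (line, ([] : List Char))
         match headingInfo content with
         | none => line
         | some (indent_len, old_level) =>
           let new_level := (max 1 (min ((old_level : Int) + offset) 6)).toNat
           -- content[:indent_len] / content[indent_len:] / [old_level:]: indices are nonneg, slices = take/drop
           let indent := content.take indent_len
           let rest := (content.drop indent_len).drop old_level
           indent ++ List.replicate new_level '#' ++ rest ++ newline]) []
    String.ofList out.flatten   -- "".join(out)

-- ===== PORT B =====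

-- the inner 'advance to the start of the next line' while/if of B's scanning loop
def lineBody (cs : List Char) : List Char := cs.takeWhile (fun c => !(c == '\r' || c == '\n'))

def lineLen (cs : List Char) : Nat :=
  match cs.drop (lineBody cs).length with
  | '\r' :: '\n' :: _ => (lineBody cs).length + 2
  | [] => (lineBody cs).length
  | _ => (lineBody cs).length + 1

theorem lineLen_pos (c : Char) (cs : List Char) : 1 ≤ lineLen (c :: cs) := by
  unfold lineLen
  split
  · omega
  · next h =>
    have hb := List.drop_eq_nil_iff.mp h
    simp only [List.length_cons] at hb
    have := List.IsPrefix.length_le (List.takeWhile_prefix (l := c :: cs) (fun c => !(c == '\r' || c == '\n')))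
    simp only [lineBody, List.length_cons] at this hb ⊢
    omega
  · omega

-- B's outer while loop: collect the (hash_start, level) span of every heading
def scanSpans (pos : Nat) (cs : List Char) : List (Nat × Nat) :=
  match cs with
  | [] => []
  | c :: cs' =>
    let il := ((c :: cs').takeWhile (fun c => c == ' ' || c == '\t')).length
    let lvl := (((c :: cs').drop il).takeWhile (· == '#')).length
    let span :=
      if 1 ≤ lvl ∧ lvl ≤ 6 then
        match (c :: cs').drop (il + lvl) with
        | d :: _ => if d == ' ' || d == '\t' then [(pos + il, lvl)] else []
        | [] => []
      else []
    let L := lineLen (c :: cs')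
    span ++ scanSpans (pos + L) ((c :: cs').drop L)
termination_by cs.length
decreasing_by
  have h1 := lineLen_pos c cs'
  simp only [List.length_drop, List.length_cons]
  omega

-- B's splice loop (parts/prev accumulator; md_text[prev:hs] with 0 ≤ prev ≤ hs is take/drop, exact)
def spliceGo (s : List Char) (off : Int) : List (Nat × Nat) → Nat → List Char
  | [], prev => s.drop prev
  | (hs, lvl) :: rest, prev =>
    let new_level := (max 1 (min ((lvl : Int) + off) 6)).toNat
    (s.drop prev).take (hs - prev) ++ List.replicate new_level '#' ++ spliceGo s off rest (hs + lvl)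

def remap_markdown_headings_alt (md_text : String) (target_top_level : Int) : String :=
  let target := max 1 (min target_top_level 6)
  let cs := md_text.toList
  match scanSpans 0 cs with
  | [] => md_text
  | (hs0, l0) :: rest =>
    -- min(level for _, level in spans): Python's min over a nonempty int sequence
    let m := rest.foldl (fun a p => min a p.2) l0
    let offset : Int := target - (m : Int)
    String.ofList (spliceGo cs offset ((hs0, l0) :: rest) 0)

-- ===== PRECONDITION & SPEC =====
def Spec_remap_markdown_headings (md_text : String) (target_top_level : Int) (out : String) : Prop := out = remap_markdown_headings_alt md_text target_top_level
instance (md_text : String) (target_top_level : Int) (out : String) : Decidable (Spec_remap_markdown_headings md_text target_top_level out) := by unfold Spec_remap_markdown_headings; infer_instance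

-- ===== CLAIM (what is proved, stated in full; the proofs are below) =====
def Claim_equal_remap_markdown_headings : Prop := ∀ (md_text : String) (target_top_level : Int), Dom_remap_markdown_headings md_text target_top_level → Spec_remap_markdown_headings md_text target_top_level (remap_markdown_headings md_text target_top_level)

-- ===== LEMMAS AND PROOFS =====

-- per-line data and per-line span/rebuild abstractions (proof only)
def contentOf (line : List Char) : List Char :=
  if line.getLast? = some '\n' then line.dropLast else line
def nlOf (line : List Char) : List Char :=
  if line.getLast? = some '\n' then ['\n'] else []
def minStep (acc : Option Nat) (info : Option (Nat × Nat)) : Option Nat :=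
  match info with
  | some (_, level) =>
    match acc with
    | none => some level
    | some m => if level < m then some level else some m
  | none => acc
def lspan (pos : Nat) (l : List Char) : List (Nat × Nat) :=
  match headingInfo (contentOf l) with
  | some (il, lvl) => [(pos + il, lvl)]
  | none => []
def spansOfLines (pos : Nat) : List (List Char) → List (Nat × Nat)
  | [] => []
  | l :: ls => lspan pos l ++ spansOfLines (pos + l.length) ls
def rebuildA (off : Int) (line : List Char) : List Char :=
  match headingInfo (contentOf line) with
  | none => line
  | some (il, lvl) =>
    line.take il ++ List.replicate (max 1 (min ((lvl : Int) + off) 6)).toNat '#' ++ line.drop (il + lvl)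

-- detection core: headingInfo without the empty-line guard, phrased on absolute drops
def hInfoCore (xs : List Char) : Option (Nat × Nat) :=
  let il := (xs.takeWhile (fun c => c == ' ' || c == '\t')).length
  let lvl := ((xs.drop il).takeWhile (· == '#')).length
  if lvl < 1 ∨ 6 < lvl then none
  else
    match xs.drop (il + lvl) with
    | [] => none
    | c :: _ => if c == ' ' || c == '\t' then some (il, lvl) else none

theorem headingInfo_eq_core (xs : List Char) : headingInfo xs = hInfoCore xs := by
  unfold headingInfo hInfoCore
  by_cases hx : xs = []
  · subst hx; simp
  · rw [if_neg hx]
    simp only [List.drop_drop]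

theorem tw_stop {p : Char → Bool} (body x : List Char)
    (h : ∀ c ∈ x.head?, p c = false) : (body ++ x).takeWhile p = body.takeWhile p := by
  induction body with
  | nil =>
    cases x with
    | nil => rfl
    | cons c t => simp [List.takeWhile_cons, h c (by simp)]
  | cons b bs ih => simp only [List.cons_append, List.takeWhile_cons]; split <;> simp [ih]

theorem core_append (body x : List Char)
    (hx : ∀ c ∈ x.head?, c = '\r' ∨ c = '\n') : hInfoCore (body ++ x) = hInfoCore body := by
  have hws : ∀ c ∈ x.head?, (c == ' ' || c == '\t') = false := by
    intro c hc; rcases hx c hc with h | h <;> subst h <;> decide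
  have hh : ∀ c ∈ x.head?, (c == '#') = false := by
    intro c hc; rcases hx c hc with h | h <;> subst h <;> decide
  have hil : ((body.takeWhile (fun c => c == ' ' || c == '\t')).length) ≤ body.length :=
    List.IsPrefix.length_le (List.takeWhile_prefix _)
  simp only [hInfoCore, tw_stop body x hws,
    List.drop_append_of_le_length hil, tw_stop (body.drop _) x hh]
  set il := (body.takeWhile (fun c => c == ' ' || c == '\t')).length with hilq
  set lvl := ((body.drop il).takeWhile (· == '#')).length with hlvlq
  have hlvl : lvl ≤ (body.drop il).length :=
    List.IsPrefix.length_le (List.takeWhile_prefix _)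
  have hsum : il + lvl ≤ body.length := by
    simp only [List.length_drop] at hlvl; omega
  rw [List.drop_append_of_le_length hsum]
  split
  · rfl
  · cases hbd : body.drop (il + lvl) with
    | cons c t => simp
    | nil =>
      simp only [List.nil_append]
      cases x with
      | nil => rfl
      | cons c t => simp [hws c (by simp)]

theorem splitKE_sound (cs : List Char) :
    ∀ l ∈ splitKE cs, l ≠ [] ∧ '\n' ∉ l.dropLast := by
  induction cs using splitKE.induct with
  | case1 => simp [splitKE]
  | case2 rest ih =>
    intro l hl
    rcases (by simpa [splitKE] using hl : l = ['\n'] ∨ l ∈ splitKE rest) with h | h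
    · subst h; simp
    · exact ih l h
  | case3 rest ih =>
    intro l hl
    rcases (by simpa [splitKE] using hl : l = ['\r', '\n'] ∨ l ∈ splitKE rest) with h | h
    · subst h; simp
    · exact ih l h
  | case4 rest hne ih =>
    intro l hl
    have : l = ['\r'] ∨ l ∈ splitKE rest := by
      rw [splitKE.eq_def] at hl
      simp at hl
      exact hl
    rcases this with h | h
    · subst h; simp
    · exact ih l h
  | case5 c rest h1 h2 h3 heq ih =>
    intro l hl
    rw [splitKE.eq_def] at hl
    split at hl
    · simp at hl
    · simp_all
    · simp_all
    · simp_all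
    · rename_i heq2
      obtain ⟨hc, hr⟩ := List.cons.inj heq2
      subst hc; subst hr
      rw [heq] at hl
      simp at hl
      subst hl
      simp
  | case6 c rest h1 h2 h3 l0 ls heq ih =>
    intro l hl
    rw [splitKE.eq_def] at hl
    split at hl
    · simp at hl
    · simp_all
    · simp_all
    · simp_all
    · rename_i heq2
      obtain ⟨hc, hr⟩ := List.cons.inj heq2
      subst hc; subst hr
      rw [heq] at hl
      simp at hl
      rcases hl with h | h
      · subst h
        have h0 := ih l0 (by rw [heq]; simp)
        rcases l0 with _ | ⟨x, xs⟩
        · exact absurd rfl h0.1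
        · refine ⟨by simp, ?_⟩
          have hd : (c :: x :: xs).dropLast = c :: (x :: xs).dropLast := rfl
          rw [hd]
          simp only [List.mem_cons, not_or]
          exact ⟨fun hc' => h1 hc'.symm, fun hm => h0.2 hm⟩
      · exact ih l (by rw [heq]; simp [h])

theorem rstripNL_eq (l : List Char) (h : '\n' ∉ l.dropLast) :
    rstripNL l = if l.getLast? = some '\n' then l.dropLast else l := by
  unfold rstripNL
  rcases hr : l.reverse with _ | ⟨a, r⟩
  · have h0 : l = [] := by simpa using congrArg List.reverse hr
    subst h0; simp
  · have hl : l = (a :: r).reverse := by rw [← hr, List.reverse_reverse]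
    subst hl
    have hdl : (a :: r).reverse.dropLast = r.reverse := by
      rw [List.dropLast_reverse]; rfl
    rw [hdl] at h
    have hnr : '\n' ∉ r := fun hm => h (by simpa using hm)
    simp only [List.getLast?_reverse, List.head?_cons, hdl]
    by_cases ha : a = '\n'
    · subst ha
      simp only [List.dropWhile_cons, beq_self_eq_true, if_true]
      rcases r with _ | ⟨x, xs⟩
      · simp
      · have hx : (x == '\n') = false := by
          simp only [beq_eq_false_iff_ne]; intro hx; exact hnr (hx ▸ List.mem_cons_self)
        simp [hx]
    · have : (a == '\n') = false := by simpa using ha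
      simp [this, ha]

theorem contentOf_append_nlOf (line : List Char) : contentOf line ++ nlOf line = line := by
  unfold contentOf nlOf
  by_cases h : line.getLast? = some '\n'
  · simp only [h, reduceIte]
    rcases line with _ | ⟨x, xs⟩
    · simp at h
    · have hne : (x :: xs : List Char) ≠ [] := by simp
      have h2 : (x :: xs).getLast hne = '\n' := by
        rw [List.getLast?_eq_some_getLast hne] at h
        exact (Option.some.injEq _ _ ▸ h)
      rw [← h2]
      exact List.dropLast_concat_getLast hne
  · simp [h]

theorem lineLen_le (cs : List Char) : lineLen cs ≤ cs.length := by
  have hbl : (lineBody cs).length ≤ cs.length :=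
    List.IsPrefix.length_le (List.takeWhile_prefix _)
  unfold lineLen
  split
  · next heq =>
    have := congrArg List.length heq
    simp only [List.length_drop, List.length_cons] at this
    omega
  · omega
  · next _ _ heq =>
    rcases hd : cs.drop (lineBody cs).length with _ | ⟨d, t⟩
    · simp_all
    · have := congrArg List.length hd
      simp only [List.length_drop, List.length_cons] at this
      omega

theorem lineLen_cons (c : Char) (cs : List Char) (h1 : c ≠ '\r') (h2 : c ≠ '\n') :
    lineLen (c :: cs) = 1 + lineLen cs := by
  have hb : lineBody (c :: cs) = c :: lineBody cs := by simp [lineBody, h1, h2]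
  unfold lineLen
  rw [hb]
  simp only [List.length_cons, List.drop_succ_cons]
  split <;> omega

theorem splitKE_ne_nil (c : Char) (cs : List Char) : splitKE (c :: cs) ≠ [] := by
  rw [splitKE.eq_def]
  split <;> simp_all
  split <;> simp

theorem splitKE_cr (rest : List Char) (hne : ∀ t, rest ≠ '\n' :: t) :
    splitKE ('\r' :: rest) = ['\r'] :: splitKE rest := by
  cases rest with
  | nil => rfl
  | cons d t =>
    have hd : d ≠ '\n' := fun h => hne t (by rw [h])
    rw [splitKE.eq_def]
    split <;> try simp_all
    all_goals
      rename_i h5 heq2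
      obtain ⟨hc, -⟩ := heq2
      exact absurd hc.symm h5

theorem splitKE_other (c : Char) (rest : List Char) (h1 : ¬c = '\n') (h3 : ¬c = '\r') :
    splitKE (c :: rest) = match splitKE rest with | [] => [[c]] | l :: ls => (c :: l) :: ls := by
  rw [splitKE.eq_def]
  split <;> simp_all

theorem splitKE_take (cs : List Char) (h : cs ≠ []) :
    splitKE cs = cs.take (lineLen cs) :: splitKE (cs.drop (lineLen cs)) := by
  induction cs using splitKE.induct with
  | case1 => simp at h
  | case2 rest ih =>
    have hL : lineLen ('\n' :: rest) = 1 := by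
      have hb : lineBody ('\n' :: rest) = [] := by simp [lineBody]
      unfold lineLen
      rw [hb]
      simp only [List.length_nil, List.drop_zero]
      all_goals split <;> simp_all
    rw [hL]
    simp [splitKE]
  | case3 rest ih =>
    have hL : lineLen ('\r' :: '\n' :: rest) = 2 := by
      have hb : lineBody ('\r' :: '\n' :: rest) = [] := by simp [lineBody]
      unfold lineLen
      rw [hb]
      simp only [List.length_nil, List.drop_zero]
      all_goals split <;> simp_all
    rw [hL]
    simp [splitKE]
  | case4 rest hne ih =>
    have hL : lineLen ('\r' :: rest) = 1 := by
      have hb : lineBody ('\r' :: rest) = [] := by simp [lineBody]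
      unfold lineLen
      rw [hb]
      simp only [List.length_nil, List.drop_zero]
      all_goals split <;> simp_all
    rw [hL, splitKE_cr rest (fun t ht => hne t ht)]
    simp
  | case5 c rest h1 h2 h3 heq ih =>
    have hrest : rest = [] := by
      cases rest with
      | nil => rfl
      | cons d t => exact absurd heq (splitKE_ne_nil d t)
    subst hrest
    have hL : lineLen [c] = 1 := by
      have hb : lineBody [c] = [c] := by simp [lineBody]; exact ⟨h3, h1⟩
      unfold lineLen
      rw [hb]
      simp
    rw [hL, splitKE_other c [] h1 h3]
    simp [splitKE]
  | case6 c rest h1 h2 h3 l0 ls heq ih =>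
    have hrne : rest ≠ [] := by
      intro hr; rw [hr] at heq; simp [splitKE] at heq
    have hL : lineLen (c :: rest) = 1 + lineLen rest := lineLen_cons c rest h3 h1
    have ih' := ih hrne
    rw [heq] at ih'
    obtain ⟨hl0, hls⟩ := List.cons.inj ih'
    rw [splitKE_other c rest h1 h3, heq, hL, Nat.add_comm 1 (lineLen rest)]
    simp only [List.take_succ_cons, List.drop_succ_cons]
    rw [hl0, hls]

theorem splitKE_flatten_aux : ∀ (n : Nat) (cs : List Char), cs.length ≤ n → (splitKE cs).flatten = cs := by
  intro n
  induction n with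
  | zero =>
    intro cs h
    have : cs = [] := by cases cs <;> simp_all
    subst this; rfl
  | succ n ih =>
    intro cs h
    cases hcs : cs with
    | nil => rfl
    | cons c t =>
      subst hcs
      rw [splitKE_take _ (by simp)]
      have h1 := lineLen_pos c t
      have h2 : ((c :: t).drop (lineLen (c :: t))).length ≤ n := by
        simp only [List.length_drop, List.length_cons] at *
        omega
      simp only [List.flatten_cons, ih _ h2, List.take_append_drop]

theorem splitKE_flatten (cs : List Char) : (splitKE cs).flatten = cs :=
  splitKE_flatten_aux cs.length cs le_rfl
theorem head_dropWhile_false (p : Char → Bool) (l : List Char) (c : Char)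
    (h : (l.dropWhile p).head? = some c) : p c = false := by
  induction l with
  | nil => simp at h
  | cons a t ih =>
    rw [List.dropWhile_cons] at h
    by_cases hp : p a
    · simp [hp] at h; exact ih (by simpa using h)
    · simp [hp] at h; subst h; simpa using hp

theorem core_bound (xs : List Char) (il lvl : Nat) (h : hInfoCore xs = some (il, lvl)) :
    il + lvl < xs.length := by
  simp only [hInfoCore] at h
  split at h
  · simp at h
  · split at h
    · simp at h
    · next c t heq =>
      split at h
      · simp only [Option.some.injEq, Prod.mk.injEq] at h
        obtain ⟨h1, h2⟩ := h
        subst h1; subst h2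
        have := congrArg List.length heq
        simp only [List.length_drop, List.length_cons] at this
        omega
      · simp at h

theorem take_line_shape (cs : List Char) (x : List Char)
    (hx : cs.drop (lineBody cs).length = x ++ cs.drop ((lineBody cs).length + x.length)) :
    cs.take ((lineBody cs).length + x.length) = lineBody cs ++ x := by
  have hpre : lineBody cs = cs.take (lineBody cs).length :=
    List.prefix_iff_eq_take.mp (List.takeWhile_prefix _)
  calc cs.take ((lineBody cs).length + x.length)
      = (cs.take (lineBody cs).length) ++ (cs.drop (lineBody cs).length).take x.length := List.take_add
    _ = lineBody cs ++ x := by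
        rw [← hpre, hx, List.take_append_of_le_length le_rfl, List.take_length]

theorem line_content (cs : List Char) :
    hInfoCore cs = headingInfo (contentOf (cs.take (lineLen cs))) := by
  have hpre : lineBody cs = cs.take (lineBody cs).length :=
    List.prefix_iff_eq_take.mp (List.takeWhile_prefix _)
  have hsplit : cs = lineBody cs ++ cs.drop (lineBody cs).length := by
    conv_lhs => rw [← List.take_append_drop (lineBody cs).length cs]
    rw [← hpre]
  have hdw : cs.drop (lineBody cs).length = cs.dropWhile (fun c => !(c == '\r' || c == '\n')) :=
    List.append_cancel_left (hsplit.symm.trans (List.takeWhile_append_dropWhile (l := cs)).symm)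
  have htail : ∀ c, (cs.drop (lineBody cs).length).head? = some c → c = '\r' ∨ c = '\n' := by
    intro c hc
    rw [hdw] at hc
    have := head_dropWhile_false _ _ _ hc
    simp only [Bool.not_eq_false] at this
    exact or_iff_not_imp_left.mpr (by simpa using this)
  have hbody_last : ∀ c, (lineBody cs).getLast? = some c → c ≠ '\n' := by
    intro c hg hcn
    subst hcn
    have hm := List.mem_of_getLast? hg
    have := List.mem_takeWhile_imp (p := fun c => !(c == '\r' || c == '\n')) hm
    simp at this
  have hcore : hInfoCore cs = hInfoCore (lineBody cs) := by
    conv_lhs => rw [hsplit]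
    refine core_append _ _ ?_
    intro c hc
    exact htail c hc
  unfold lineLen
  split
  · next t heq =>
    -- terminator "\r\n"
    have hline : cs.take ((lineBody cs).length + 2) = lineBody cs ++ ['\r', '\n'] :=
      take_line_shape cs ['\r', '\n'] (by
        have h2' : cs.drop ((lineBody cs).length + 2) = t := by
          have h3 : List.drop 2 (List.drop (lineBody cs).length cs) = t := by rw [heq]; rfl
          rw [List.drop_drop] at h3
          exact h3
        simp [heq, h2'])
    rw [hline]
    have hlast : (lineBody cs ++ ['\r', '\n']).getLast? = some '\n' := by
      rw [List.getLast?_append]; rfl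
    have hcont : contentOf (lineBody cs ++ ['\r', '\n']) = lineBody cs ++ ['\r'] := by
      unfold contentOf
      rw [if_pos hlast, show lineBody cs ++ ['\r', '\n'] = (lineBody cs ++ ['\r']) ++ ['\n'] by simp,
        List.dropLast_concat]
    rw [hcont, headingInfo_eq_core, core_append _ ['\r'] (by intro c hc; simp at hc; left; exact hc.symm), hcore]
  · next heq =>
    -- no terminator: last line
    have hcs : cs = lineBody cs := by
      conv_lhs => rw [hsplit, heq]
      simp
    have hcont : contentOf (cs.take (lineBody cs).length) = lineBody cs := by
      rw [← hpre]
      unfold contentOf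
      rw [if_neg (fun hg => hbody_last '\n' hg rfl)]
    rw [hcont, headingInfo_eq_core, hcore]
  · next x h1 h2 =>
    -- single-char terminator '\n' or lone '\r'
    rcases hd : (cs.drop (lineBody cs).length) with _ | ⟨d, t⟩
    · exact absurd hd h2
    · have hdchar := htail d (by rw [hd]; rfl)
      have hline : cs.take ((lineBody cs).length + 1) = lineBody cs ++ [d] :=
        take_line_shape cs [d] (by
          have h2' : cs.drop ((lineBody cs).length + 1) = t := by
            have h3 : List.drop 1 (List.drop (lineBody cs).length cs) = t := by rw [hd]; rfl
            rw [List.drop_drop] at h3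
            exact h3
          simp [hd, h2'])
      rw [hline]
      rcases hdchar with hdr | hdn
      · -- lone '\r' terminator
        subst hdr
        have hcont : contentOf (lineBody cs ++ ['\r']) = lineBody cs ++ ['\r'] := by
          unfold contentOf
          rw [if_neg (by rw [List.getLast?_append]; simp)]
        rw [hcont, headingInfo_eq_core,
          core_append _ ['\r'] (by intro c hc; simp at hc; left; exact hc.symm), hcore]
      · -- '\n' terminator
        subst hdn
        have hcont : contentOf (lineBody cs ++ ['\n']) = lineBody cs := by
          unfold contentOf
          rw [if_pos (by rw [List.getLast?_append]; rfl), List.dropLast_concat]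
        rw [hcont, headingInfo_eq_core, hcore]
theorem span_match (pos il lvl : Nat) (rest : List Char) :
    (if 1 ≤ lvl ∧ lvl ≤ 6 then
        match rest with
        | d :: _ => if d == ' ' || d == '\t' then [(pos + il, lvl)] else []
        | [] => []
      else []) =
      (match (if lvl < 1 ∨ 6 < lvl then none
        else match rest with
          | [] => none
          | c :: _ => if c == ' ' || c == '\t' then some (il, lvl) else none : Option (Nat × Nat)) with
       | some (il, lvl) => [(pos + il, lvl)]
       | none => []) := by
  by_cases h16 : 1 ≤ lvl ∧ lvl ≤ 6
  · rw [if_pos h16, if_neg (by omega)]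
    cases rest with
    | nil => rfl
    | cons d t =>
      by_cases hw : (d == ' ' || d == '\t') = true
      · simp [hw]
      · simp [hw]
  · rw [if_neg h16, if_pos (by omega)]

theorem scanSpans_cons (c : Char) (cs' : List Char) (pos : Nat) :
    scanSpans pos (c :: cs') =
      (match hInfoCore (c :: cs') with
       | some (il, lvl) => [(pos + il, lvl)]
       | none => []) ++ scanSpans (pos + lineLen (c :: cs')) ((c :: cs').drop (lineLen (c :: cs'))) := by
  rw [scanSpans]
  simp only [hInfoCore]
  exact congrArg (· ++ _) (span_match pos _ _ _)

theorem scan_eq_spans_aux : ∀ (n : Nat) (cs : List Char), cs.length ≤ n → ∀ (pos : Nat),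
    scanSpans pos cs = spansOfLines pos (splitKE cs) := by
  intro n
  induction n with
  | zero =>
    intro cs h pos
    have : cs = [] := by cases cs <;> simp_all
    subst this
    simp [scanSpans, splitKE, spansOfLines]
  | succ n ih =>
    intro cs h pos
    cases cs with
    | nil => simp [scanSpans, splitKE, spansOfLines]
    | cons c cs' =>
      rw [scanSpans_cons, splitKE_take _ (by simp), spansOfLines]
      congr 1
      · rw [lspan, ← line_content]
      · have hlen : ((c :: cs').take (lineLen (c :: cs'))).length = lineLen (c :: cs') := by
          rw [List.length_take]
          exact min_eq_left (lineLen_le _)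
        rw [hlen]
        refine ih _ ?_ _
        have h1 := lineLen_pos c cs'
        simp only [List.length_drop, List.length_cons] at *
        omega

theorem scan_eq_spans (cs : List Char) (pos : Nat) :
    scanSpans pos cs = spansOfLines pos (splitKE cs) :=
  scan_eq_spans_aux cs.length cs le_rfl pos

theorem spans_lb : ∀ (lines : List (List Char)) (pos hs lvl : Nat),
    (hs, lvl) ∈ spansOfLines pos lines → pos ≤ hs := by
  intro lines
  induction lines with
  | nil => intro pos hs lvl h; simp [spansOfLines] at h
  | cons l ls ih =>
    intro pos hs lvl h
    rw [spansOfLines, List.mem_append] at h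
    rcases h with h | h
    · unfold lspan at h
      split at h <;> simp_all
    · have := ih _ _ _ h
      omega

theorem splice_advance (s : List Char) (off : Int) (spans : List (Nat × Nat)) (prev d : Nat)
    (h : ∀ p ∈ spans.head?, prev + d ≤ p.1) :
    spliceGo s off spans prev = (s.drop prev).take d ++ spliceGo s off spans (prev + d) := by
  cases spans with
  | nil =>
    show s.drop prev = (s.drop prev).take d ++ s.drop (prev + d)
    rw [show s.drop (prev + d) = (s.drop prev).drop d from (List.drop_drop).symm,
      List.take_append_drop]
  | cons p rest =>
    obtain ⟨hs, lvl⟩ := p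
    have hhd : prev + d ≤ hs := h (hs, lvl) rfl
    simp only [spliceGo]
    rw [show hs - prev = d + (hs - (prev + d)) by omega, List.take_add, List.drop_drop]
    simp [List.append_assoc]

theorem contentOf_length_le (l : List Char) : (contentOf l).length ≤ l.length := by
  unfold contentOf
  split
  · simp [List.length_dropLast]
  · exact le_rfl

theorem splice_lines : ∀ (lines : List (List Char)) (p : Nat) (s : List Char) (off : Int),
    s.drop p = lines.flatten →
    (∀ l ∈ lines, ∀ il lvl, headingInfo (contentOf l) = some (il, lvl) → il + lvl ≤ l.length) →
    spliceGo s off (spansOfLines p lines) p = (lines.map (rebuildA off)).flatten := by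
  intro lines
  induction lines with
  | nil =>
    intro p s off h _
    show s.drop p = _
    simp [h]
  | cons l ls ih =>
    intro p s off h hwf
    simp only [List.flatten_cons] at h
    have hdrop : s.drop (p + l.length) = ls.flatten := by
      rw [show s.drop (p + l.length) = (s.drop p).drop l.length from (List.drop_drop).symm, h,
        List.drop_left]
    have hwfl := hwf l (by simp)
    have hwfs : ∀ l' ∈ ls, ∀ il lvl, headingInfo (contentOf l') = some (il, lvl) → il + lvl ≤ l'.length :=
      fun l' hl' => hwf l' (by simp [hl'])
    rw [spansOfLines]
    cases hinfo : headingInfo (contentOf l) with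
    | none =>
      have hl0 : lspan p l = [] := by unfold lspan; rw [hinfo]
      rw [hl0, List.nil_append,
        splice_advance s off _ p l.length
          (by
            intro q hq
            have hmem : q ∈ spansOfLines (p + l.length) ls := List.mem_of_mem_head? hq
            exact spans_lb ls _ q.1 q.2 (by simpa using hmem)),
        show (s.drop p).take l.length = l by rw [h, List.take_append_of_le_length le_rfl, List.take_length]]
      rw [List.map_cons, List.flatten_cons, rebuildA, hinfo]
      rw [ih _ _ _ hdrop hwfs]
    | some info =>
      obtain ⟨il, lvl⟩ := info
      have hb : il + lvl ≤ l.length := hwfl il lvl hinfo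
      have hl0 : lspan p l = [(p + il, lvl)] := by unfold lspan; rw [hinfo]
      rw [hl0, List.singleton_append]
      show (s.drop p).take (p + il - p) ++ _ ++ spliceGo s off _ (p + il + lvl) = _
      rw [show p + il - p = il by omega]
      have htake : (s.drop p).take il = l.take il := by
        rw [h, List.take_append_of_le_length (by omega)]
      have hadv := splice_advance s off (spansOfLines (p + l.length) ls) (p + il + lvl)
        (l.length - (il + lvl))
        (by
          intro q hq
          have hmem : q ∈ spansOfLines (p + l.length) ls := List.mem_of_mem_head? hq
          have := spans_lb ls _ q.1 q.2 (by simpa using hmem)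
          omega)
      rw [hadv, show p + il + lvl + (l.length - (il + lvl)) = p + l.length by omega]
      have hmid : (s.drop (p + il + lvl)).take (l.length - (il + lvl)) = l.drop (il + lvl) := by
        have h2 : s.drop (p + (il + lvl)) = l.drop (il + lvl) ++ ls.flatten := by
          rw [show s.drop (p + (il + lvl)) = (s.drop p).drop (il + lvl) from (List.drop_drop).symm, h,
            List.drop_append_of_le_length hb]
        rw [show p + il + lvl = p + (il + lvl) by omega, h2,
          show l.length - (il + lvl) = (l.drop (il + lvl)).length by simp [List.length_drop],
          List.take_append_of_le_length le_rfl, List.take_length]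
      rw [htake, hmid, ih _ _ _ hdrop hwfs]
      rw [List.map_cons, List.flatten_cons, rebuildA, hinfo]
      simp [List.append_assoc]
theorem minStep_fold : ∀ (lines : List (List Char)) (pos : Nat) (acc : Option Nat),
    lines.foldl (fun acc line => minStep acc (headingInfo (contentOf line))) acc
      = ((spansOfLines pos lines).map Prod.snd).foldl
          (fun a lvl => some (match a with | none => lvl | some m => min m lvl)) acc := by
  intro lines
  induction lines with
  | nil => intro pos acc; rfl
  | cons l ls ih =>
    intro pos acc
    rw [spansOfLines, List.foldl_cons, List.map_append, List.foldl_append]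
    cases hinfo : headingInfo (contentOf l) with
    | none =>
      have h0 : minStep acc none = acc := rfl
      rw [show lspan pos l = [] by unfold lspan; rw [hinfo], h0]
      exact ih _ acc
    | some p =>
      obtain ⟨il, lvl⟩ := p
      rw [show lspan pos l = [(pos + il, lvl)] by unfold lspan; rw [hinfo]]
      have h1 : minStep acc (some (il, lvl)) =
          some (match acc with | none => lvl | some m => min m lvl) := by
        cases acc with
        | none => rfl
        | some m =>
          simp only [minStep]
          split <;> rename_i hlt
          · rw [Nat.min_def, if_neg (by omega)]
          · rw [Nat.min_def, if_pos (by omega)]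
      rw [h1]
      exact ih _ _

theorem foldl_optmin : ∀ (L : List Nat) (v : Nat),
    L.foldl (fun a lvl => some (match a with | none => lvl | some m => min m lvl)) (some v)
      = some (L.foldl min v) := by
  intro L
  induction L with
  | nil => intro v; rfl
  | cons a t ih => intro v; simpa using ih (min v a)

theorem afold_eq (lines : List (List Char))
    (hinv : ∀ l ∈ lines, l ≠ [] ∧ '\n' ∉ l.dropLast) (m : Option Nat) :
    lines.foldl (fun acc line =>
      match headingInfo (rstripNL line) with
      | none => acc
      | some (_, level) =>
        match acc with
        | none => some level
        | some m => if level < m then some level else acc) m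
    = lines.foldl (fun acc line => minStep acc (headingInfo (contentOf line))) m := by
  induction lines generalizing m with
  | nil => rfl
  | cons line rest ih =>
    simp only [List.foldl_cons]
    have hr : rstripNL line = contentOf line := by
      rw [rstripNL_eq line (hinv line (by simp)).2]; rfl
    rw [hr]
    have hstep : (match headingInfo (contentOf line) with
        | none => m
        | some (_, level) =>
          match m with
          | none => some level
          | some m' => if level < m' then some level else m)
        = minStep m (headingInfo (contentOf line)) := by
      unfold minStep
      rcases headingInfo (contentOf line) with _ | ⟨_, level⟩ <;> cases m <;> simp
    rw [hstep]
    exact ih (fun l hl => hinv l (by simp [hl])) _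

theorem rebuild_eq (off : Int) (l : List Char) :
    (let (content, newline) :=
       if l.getLast? = some '\n' then (l.dropLast, ['\n']) else (l, ([] : List Char))
     match headingInfo content with
     | none => l
     | some (indent_len, old_level) =>
       let new_level := (max 1 (min ((old_level : Int) + off) 6)).toNat
       let indent := content.take indent_len
       let rest := (content.drop indent_len).drop old_level
       indent ++ List.replicate new_level '#' ++ rest ++ newline) = rebuildA off l := by
  have hc : (if l.getLast? = some '\n' then (l.dropLast, ['\n']) else (l, ([] : List Char)))
      = (contentOf l, nlOf l) := by
    unfold contentOf nlOf; split <;> rfl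
  rw [hc]
  dsimp only
  cases hinfo : headingInfo (contentOf l) with
  | none => unfold rebuildA; rw [hinfo]
  | some p =>
    obtain ⟨il, lvl⟩ := p
    unfold rebuildA
    rw [hinfo]
    dsimp only
    have hb : il + lvl < (contentOf l).length :=
      core_bound (contentOf l) il lvl (by rw [← headingInfo_eq_core]; exact hinfo)
    have hl := contentOf_append_nlOf l
    conv_rhs => rw [← hl]
    rw [List.take_append_of_le_length (by omega), List.drop_append_of_le_length (by omega),
      List.drop_drop]
    simp [List.append_assoc]
-- ===== VERDICT (by name: the statement is the Claim_ definition above) =====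
theorem remap_markdown_headings_spec : Claim_equal_remap_markdown_headings := by
  intro md_text target_top_level _
  unfold Spec_remap_markdown_headings remap_markdown_headings remap_markdown_headings_alt
  simp only []
  rw [scan_eq_spans md_text.toList 0]
  have hinv := splitKE_sound md_text.toList
  have hwf : ∀ l ∈ splitKE md_text.toList, ∀ il lvl,
      headingInfo (contentOf l) = some (il, lvl) → il + lvl ≤ l.length := by
    intro l _ il lvl hinfo
    have h1 : il + lvl < (contentOf l).length :=
      core_bound (contentOf l) il lvl (by rw [← headingInfo_eq_core]; exact hinfo)
    have h2 := contentOf_length_le l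
    omega
  rw [afold_eq (splitKE md_text.toList) hinv none,
    minStep_fold (splitKE md_text.toList) 0 none]
  cases hsp : spansOfLines 0 (splitKE md_text.toList) with
  | nil => rfl
  | cons p rest =>
    obtain ⟨hs0, l0⟩ := p
    have hmin : (((hs0, l0) :: rest).map Prod.snd).foldl
        (fun a lvl => some (match a with | none => lvl | some m => min m lvl)) none
        = some (rest.foldl (fun a p => min a p.2) l0) := by
      rw [List.map_cons, List.foldl_cons, foldl_optmin]
      rw [List.foldl_map]
    rw [hmin]
    simp only []
    rw [PySem.List.foldl_append_singleton_eq_map, List.nil_append]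
    have hsplice := splice_lines (splitKE md_text.toList) 0 md_text.toList
      (max 1 (min target_top_level 6) - (((rest.foldl (fun (a : Nat) (p : Nat × Nat) => min a p.2) l0 : Nat)) : Int))
      (by simp [splitKE_flatten]) hwf
    rw [hsp] at hsplice
    rw [hsplice]
    congr 1
    apply congrArg
    exact List.map_congr_left (fun l _ => rebuild_eq _ l)
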